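-- pv_equiv track=rewrite | github.com/deepabjoshi/python_utils | digit_utils.py | left_rotate_digits_gen
-- ===== SOURCE A (Python) =====
-- def left_rotate_digits_gen(num, rotations=None):
--     num_digits = len(str(num))
--     multiplier = pow(10, num_digits - 1)
--     if not rotations:
--         rotations = num_digits
--     for i in range(0, rotations):
--         q, r = divmod(num, multiplier)
--         num = r * 10 + q
--         yield num
-- ===== SOURCE B (Python) =====
-- def left_rotate_digits_gen(num, rotations=None):
--     num_digits = len(str(num))
--     modulus = pow(10, num_digits) - 1
--     if not rotations:
--         rotations = num_digits
--     if num % modulus == 0 and num != 0: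
--         # all-nines fixed point of the cycle: every rotation is num itself
--         for _ in range(rotations):
--             yield num
--     else:
--         p = num % modulus
--         for _ in range(rotations):
--             p = p * 10 % modulus
--             yield p
-- ===== Notes on version B (the rewrite author's own statement) =====
-- stated objective: alternative
-- what changed: A rotates by recomputing divmod(num, 10^(d-1)) each step; B uses the number-theoretic view of digit rotation: one left rotation is multiplication by 10 modulo 10^d - 1, so it iterates p = p*10 % modulus from p = num % modulus, with the all-nines fixed point (num % modulus == 0, num != 0) emitted directly.
import Mathlib
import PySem

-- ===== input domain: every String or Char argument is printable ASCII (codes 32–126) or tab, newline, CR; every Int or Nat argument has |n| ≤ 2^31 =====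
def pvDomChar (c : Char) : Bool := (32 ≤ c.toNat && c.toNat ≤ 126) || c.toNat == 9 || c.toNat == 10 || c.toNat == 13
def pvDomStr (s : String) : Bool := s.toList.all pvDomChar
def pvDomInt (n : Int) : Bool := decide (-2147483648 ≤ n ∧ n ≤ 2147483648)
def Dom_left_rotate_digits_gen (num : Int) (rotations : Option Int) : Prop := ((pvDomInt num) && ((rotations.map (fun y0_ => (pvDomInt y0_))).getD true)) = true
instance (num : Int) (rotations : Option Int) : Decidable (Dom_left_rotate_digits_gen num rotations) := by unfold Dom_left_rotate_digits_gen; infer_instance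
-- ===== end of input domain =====

-- B replaces A's per-step divmod digit rotation by the number-theoretic view:
-- a left digit rotation is multiplication by 10 modulo 10^d - 1 (all-nines fixed point emitted directly); objective: alternative.

-- ===== PORT A =====
-- A's `for i in range(0, rotations)` loop: one divmod rotation step per iteration, yielding each new num
def lrLoopA (multiplier : Int) (num : Int) : Nat → List Int
  | 0 => []
  | n+1 =>
    let q := PySem.Int.floordiv num multiplier
    let r := PySem.Int.mod num multiplier
    let num' := r * 10 + q
    num' :: lrLoopA multiplier num' n

def left_rotate_digits_gen (num : Int) (rotations : Option Int) : List Int :=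
  let num_digits : Int := PySem.Str.len (PySem.Int.toStr num)
  -- pow(10, num_digits - 1): the exponent is ≥ 0 since str(num) is nonempty
  let multiplier : Int := 10 ^ (num_digits - 1).toNat
  -- `if not rotations: rotations = num_digits` (None and 0 are falsy)
  let rot : Int := match rotations with
    | none => num_digits
    | some r => if r = 0 then num_digits else r
  lrLoopA multiplier num rot.toNat

-- ===== PORT B =====
-- Source B's fixed-point branch: `for _ in range(rotations): yield num`
def lrEmitFix (num : Int) : Nat → List Int
  | 0 => []
  | n+1 => num :: lrEmitFix num n

-- Source B's modular loop: `p = p * 10 % modulus`, yielded each iteration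
def lrEmitMod (modulus : Int) (p : Int) : Nat → List Int
  | 0 => []
  | n+1 =>
    let p' := PySem.Int.mod (p * 10) modulus
    p' :: lrEmitMod modulus p' n

def left_rotate_digits_gen_alt (num : Int) (rotations : Option Int) : List Int :=
  let num_digits : Int := PySem.Str.len (PySem.Int.toStr num)
  let modulus : Int := 10 ^ num_digits.toNat - 1
  let rot : Int := match rotations with
    | none => num_digits
    | some r => if r = 0 then num_digits else r
  if PySem.Int.mod num modulus = 0 ∧ num ≠ 0 then
    lrEmitFix num rot.toNat
  else
    lrEmitMod modulus (PySem.Int.mod num modulus) rot.toNat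

-- ===== PRECONDITION & SPEC =====
def Spec_left_rotate_digits_gen (num : Int) (rotations : Option Int) (out : List Int) : Prop := out = left_rotate_digits_gen_alt num rotations
instance (num : Int) (rotations : Option Int) (out : List Int) : Decidable (Spec_left_rotate_digits_gen num rotations out) := by unfold Spec_left_rotate_digits_gen; infer_instance

-- ===== CLAIM (what is proved, stated in full; the proofs are below) =====
def Claim_equal_left_rotate_digits_gen : Prop := ∀ (num : Int) (rotations : Option Int), Dom_left_rotate_digits_gen num rotations → Spec_left_rotate_digits_gen num rotations (left_rotate_digits_gen num rotations)

-- ===== LEMMAS AND PROOFS =====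

-- the rotation step A's loop iterates
def lrStep (m x : Int) : Int := PySem.Int.mod x m * 10 + PySem.Int.floordiv x m

-- one step on the window (-M, 10M) \ {10M-1} is multiplication by 10 mod 10M-1, landing in [0, 10M-1)
lemma lrStep_eq_mulMod {M x : Int} (hM : 0 < M) (hlo : -M < x) (hhi : x < 10*M) (hne : x ≠ 10*M - 1) :
    lrStep M x = (x * 10) % (10*M - 1) ∧ 0 ≤ lrStep M x ∧ lrStep M x < 10*M - 1 := by
  have hstep : lrStep M x = x % M * 10 + x / M := by
    rw [lrStep, PySem.Int.mod_eq_emod_of_pos hM, PySem.Int.floordiv_eq_ediv_of_pos hM]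
  set q := x / M with hq
  set r := x % M with hr
  have heq : M * q + r = x := Int.ediv_add_emod x M
  have hr0 : 0 ≤ r := Int.emod_nonneg x (ne_of_gt hM)
  have hr1 : r < M := Int.emod_lt_of_pos x hM
  have hq9 : q ≤ 9 := by
    by_contra h
    push_neg at h
    have : M * 10 ≤ M * q := mul_le_mul_of_nonneg_left (by omega) hM.le
    linarith
  have hqm1 : -1 ≤ q := by
    by_contra h
    push_neg at h
    have : M * q ≤ M * (-2) := mul_le_mul_of_nonneg_left (by omega) hM.le
    linarith
  have h0 : 0 ≤ lrStep M x := by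
    rw [hstep]
    rcases eq_or_lt_of_le hqm1 with h | h
    · -- q = -1 : then r = x + M ≥ 1
      rw [← h] at heq ⊢
      omega
    · linarith
  have h1 : lrStep M x < 10*M - 1 := by
    by_contra h
    push_neg at h
    rw [hstep] at h
    have hq' : q = 9 := by linarith
    have hr' : r = M - 1 := by linarith
    rw [hq', hr'] at heq
    apply hne
    linarith
  refine ⟨?_, h0, h1⟩
  have hdvd : (10*M - 1) ∣ (lrStep M x - x * 10) := by
    refine ⟨-q, ?_⟩
    rw [hstep]
    linear_combination (10 : ℤ) * heq
  have hmeq : x * 10 ≡ lrStep M x [ZMOD 10*M - 1] := Int.modEq_iff_dvd.mpr hdvd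
  have hres : (x * 10) % (10*M - 1) = (lrStep M x) % (10*M - 1) := hmeq
  rw [hres, Int.emod_eq_of_lt h0 h1]

-- on [0, 10M-1) A's loop and B's modular loop coincide state for state
lemma lrEmit_eq : ∀ (n : Nat) {M x : Int}, 0 < M → 0 ≤ x → x < 10*M - 1 →
    lrLoopA M x n = lrEmitMod (10*M - 1) x n := by
  intro n
  induction n with
  | zero => intro M x _ _ _; rfl
  | succ k ih =>
    intro M x hM hx0 hx1
    obtain ⟨hmod, h0, h1⟩ := lrStep_eq_mulMod hM (by linarith) (by linarith) (by omega)
    have hN : (0:Int) < 10*M - 1 := by linarith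
    have hhead : PySem.Int.mod (x * 10) (10*M - 1) = lrStep M x := by
      rw [PySem.Int.mod_eq_emod_of_pos hN, ← hmod]
    simp only [lrLoopA, lrEmitMod, hhead]
    have hA : PySem.Int.mod x M * 10 + PySem.Int.floordiv x M = lrStep M x := rfl
    rw [hA, ih hM h0 h1]

-- entering the loop from an arbitrary start in (-M, 10M) \ {10M-1}
lemma lrEntry : ∀ (n : Nat) {M num : Int}, 0 < M → -M < num → num < 10*M → num ≠ 10*M - 1 →
    lrLoopA M num n = lrEmitMod (10*M - 1) (PySem.Int.mod num (10*M - 1)) n := by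
  intro n M num hM hlo hhi hne
  cases n with
  | zero => rfl
  | succ k =>
    have hN : (0:Int) < 10*M - 1 := by linarith
    obtain ⟨hmod, h0, h1⟩ := lrStep_eq_mulMod hM hlo hhi hne
    have hcongr : (num % (10*M - 1)) * 10 ≡ num * 10 [ZMOD 10*M - 1] :=
      Int.ModEq.mul_right 10 (Int.emod_emod_of_dvd num (dvd_refl _))
    have hhead : PySem.Int.mod (PySem.Int.mod num (10*M - 1) * 10) (10*M - 1) = lrStep M num := by
      rw [PySem.Int.mod_eq_emod_of_pos hN, PySem.Int.mod_eq_emod_of_pos hN]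
      calc (num % (10*M - 1)) * 10 % (10*M - 1) = num * 10 % (10*M - 1) := hcongr
        _ = lrStep M num := hmod.symm
    simp only [lrLoopA, lrEmitMod, hhead]
    have hA : PySem.Int.mod num M * 10 + PySem.Int.floordiv num M = lrStep M num := rfl
    rw [hA, lrEmit_eq k hM h0 h1]

-- the all-nines number is a fixed point of A's rotation step
lemma lrStep_fix {M : Int} (hM : 0 < M) : lrStep M (10*M - 1) = 10*M - 1 := by
  have huniq : (10*M - 1) / M = 9 ∧ (10*M - 1) % M = M - 1 :=
    (Int.ediv_emod_unique hM).mpr ⟨by ring, by omega, by omega⟩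
  rw [lrStep, PySem.Int.mod_eq_emod_of_pos hM, PySem.Int.floordiv_eq_ediv_of_pos hM,
    huniq.1, huniq.2]
  ring

lemma lrFix : ∀ (n : Nat) {M : Int}, 0 < M → lrLoopA M (10*M - 1) n = lrEmitFix (10*M - 1) n := by
  intro n
  induction n with
  | zero => intro M _; rfl
  | succ k ih =>
    intro M hM
    have hA : PySem.Int.mod (10*M - 1) M * 10 + PySem.Int.floordiv (10*M - 1) M = lrStep M (10*M - 1) := rfl
    simp only [lrLoopA, lrEmitFix, hA, lrStep_fix hM]
    rw [ih hM]

-- case analysis on Source B's branch, for any start in (-M, 10M)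
lemma lrMainCase {M num : Int} (hM : 0 < M) (hlo : -M < num) (hhi : num < 10*M) (n : Nat) :
    lrLoopA M num n =
      (if PySem.Int.mod num (10*M - 1) = 0 ∧ num ≠ 0 then lrEmitFix num n
       else lrEmitMod (10*M - 1) (PySem.Int.mod num (10*M - 1)) n) := by
  have hN : (0:Int) < 10*M - 1 := by linarith
  by_cases hfix : num = 10*M - 1
  · subst hfix
    rw [if_pos ⟨by rw [PySem.Int.mod_eq_emod_of_pos hN, Int.emod_self], by omega⟩]
    exact lrFix n hM
  · have hcond : ¬ (PySem.Int.mod num (10*M - 1) = 0 ∧ num ≠ 0) := by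
      rcases lt_trichotomy num 0 with hneg | hz | hpos
      · -- negative start: the residue is num + (10M-1) > 0
        have hval : PySem.Int.mod num (10*M - 1) = num + (10*M - 1) := by
          rw [PySem.Int.mod_eq_emod_of_pos hN]
          have h := Int.add_mul_emod_self_left (a := num) (b := 10*M - 1) (c := 1)
          rw [mul_one] at h
          rw [← h, Int.emod_eq_of_lt (by linarith) (by linarith)]
        rintro ⟨h1, _⟩
        rw [hval] at h1
        linarith
      · rintro ⟨_, h2⟩; exact h2 hz
      · -- positive start below the all-nines bound: the residue is num itself
        have hval : PySem.Int.mod num (10*M - 1) = num := by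
          rw [PySem.Int.mod_eq_emod_of_pos hN, Int.emod_eq_of_lt hpos.le (by omega)]
        rintro ⟨h1, _⟩
        rw [hval] at h1
        linarith
    rw [if_neg hcond]
    exact lrEntry n hM hlo hhi hfix

-- a number is < 10 ^ (number of its decimal digit characters)
lemma toDigitsCore_lower (b : Nat) (hb : 2 ≤ b) :
    ∀ (f n : Nat) (l : List Char), n < f →
      n < b ^ ((Nat.toDigitsCore b f n l).length - l.length) ∧
      l.length < (Nat.toDigitsCore b f n l).length := by
  intro f
  induction f with
  | zero => intro n l h; exact absurd h (by omega)
  | succ f ih =>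
    intro n l h
    rw [Nat.toDigitsCore]
    by_cases hz : n / b = 0
    · rw [if_pos hz]
      simp only [List.length_cons]
      have hnb : n < b := by
        rcases Nat.div_eq_zero_iff.mp hz with h' | h'
        · omega
        · exact h'
      constructor
      · have he : (l.length + 1) - l.length = 1 := by omega
        rw [he, pow_one]
        exact hnb
      · omega
    · rw [if_neg hz]
      have hnpos : 0 < n := by
        rcases Nat.eq_zero_or_pos n with h' | h'
        · subst h'; simp at hz
        · exact h'
      have hrec : n / b < f := by
        have := Nat.div_lt_self hnpos (by omega : 1 < b)
        omega
      obtain ⟨ih1, ih2⟩ := ih (n / b) ((n % b).digitChar :: l) hrec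
      simp only [List.length_cons] at ih1 ih2
      set L := (Nat.toDigitsCore b f (n / b) ((n % b).digitChar :: l)).length with hL
      constructor
      · have he : L - l.length = (L - (l.length + 1)) + 1 := by omega
        rw [he, pow_succ]
        have h1 : n / b + 1 ≤ b ^ (L - (l.length + 1)) := ih1
        have hdm := Nat.div_add_mod n b
        have hmb : n % b < b := Nat.mod_lt _ (by omega)
        calc n < b * (n / b) + b := by omega
          _ = b * (n / b + 1) := by ring
          _ ≤ b * b ^ (L - (l.length + 1)) := Nat.mul_le_mul_left b h1
          _ = b ^ (L - (l.length + 1)) * b := by ring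
      · omega

lemma toDigits_lower (n : Nat) : n < 10 ^ (Nat.toDigits 10 n).length := by
  have h := (toDigitsCore_lower 10 (by omega) (n+1) n [] (by omega)).1
  simpa [Nat.toDigits] using h

lemma toDigits_len_pos (n : Nat) : 0 < (Nat.toDigits 10 n).length := by
  have h := (toDigitsCore_lower 10 (by omega) (n+1) n [] (by omega)).2
  simpa [Nat.toDigits] using h

lemma lrL_pos (num : Int) : 0 < (PySem.Int.toChars num).length := by
  rw [PySem.Int.toChars]
  split
  · simp
  · exact toDigits_len_pos _

-- every num lies in the window (-M, 10M) for M = 10^(len(str(num)) - 1)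
lemma lrBounds (num : Int) :
    -(10:Int) ^ ((PySem.Int.toChars num).length - 1) < num ∧
    num < 10 * 10 ^ ((PySem.Int.toChars num).length - 1) := by
  have hMpos : ∀ e : Nat, (0:Int) < 10 ^ e := fun e => pow_pos (by norm_num) e
  by_cases hneg : num < 0
  · have hchars : PySem.Int.toChars num = '-' :: Nat.toDigits 10 num.natAbs := by
      rw [PySem.Int.toChars, if_pos hneg]
    rw [hchars]
    simp only [List.length_cons, Nat.add_sub_cancel]
    have habs : (num.natAbs : Int) < 10 ^ (Nat.toDigits 10 num.natAbs).length := by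
      exact_mod_cast toDigits_lower num.natAbs
    have hna : (num.natAbs : Int) = -num := Int.ofNat_natAbs_of_nonpos hneg.le
    constructor
    · omega
    · have := hMpos (Nat.toDigits 10 num.natAbs).length
      linarith
  · push_neg at hneg
    have hchars : PySem.Int.toChars num = Nat.toDigits 10 num.toNat := by
      rw [PySem.Int.toChars, if_neg (by omega)]
    rw [hchars]
    set e := (Nat.toDigits 10 num.toNat).length with he
    have hepos : 0 < e := toDigits_len_pos num.toNat
    have hub : num < 10 * 10 ^ (e - 1) := by
      have h1 : (num.toNat : Int) < (10:Int) ^ e := by exact_mod_cast toDigits_lower num.toNat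
      have h3 : ((10:Int) ^ e) = 10 * 10 ^ (e - 1) := by
        conv_lhs => rw [show e = (e - 1) + 1 by omega]
        rw [pow_succ]
        ring
      rw [Int.toNat_of_nonneg hneg] at h1
      omega
    exact ⟨by have := hMpos (e - 1); omega, hub⟩

-- length of str(num) as a Nat
lemma lrLen_eq (num : Int) :
    PySem.Str.len (PySem.Int.toStr num) = ((PySem.Int.toChars num).length : Int) := by
  rw [PySem.Str.len, PySem.Int.toList_toStr]

-- ===== VERDICT (by name: the statement is the Claim_ definition above) =====
theorem left_rotate_digits_gen_spec : Claim_equal_left_rotate_digits_gen := by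
  intro num rotations _
  unfold Spec_left_rotate_digits_gen left_rotate_digits_gen left_rotate_digits_gen_alt
  simp only [lrLen_eq]
  have hL : 0 < (PySem.Int.toChars num).length := lrL_pos num
  set L := (PySem.Int.toChars num).length with hLdef
  have h1 : (((L:Nat):Int) - 1).toNat = L - 1 := by omega
  have h2 : (((L:Nat):Int)).toNat = L := by omega
  have hpow : (10:Int) ^ L - 1 = 10 * 10 ^ (L - 1) - 1 := by
    conv_lhs => rw [show L = (L - 1) + 1 by omega]
    rw [pow_succ]
    ring
  simp only [h1, h2, hpow]
  exact lrMainCase (pow_pos (by norm_num) (L - 1)) (lrBounds num).1 (lrBounds num).2 _
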